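-- pv_equiv track=rewrite | github.com/Yustian-Faza/disease-prediction-app | disease_prediction_app.py | update_possible_diseases_logic
-- ===== SOURCE A (Python) =====
-- def update_possible_diseases_logic(selected_symptoms_set, disease_symptom_map_arg):
--     if not selected_symptoms_set:
--         return sorted(list(disease_symptom_map_arg.keys()))
--
--     current_possible_diseases = []
--     for disease, symptoms_of_disease in disease_symptom_map_arg.items():
--         if selected_symptoms_set.issubset(set(symptoms_of_disease)):
--             current_possible_diseases.append(disease)
--
--     return sorted(current_possible_diseases)
-- ===== SOURCE B (Python) =====
-- def update_possible_diseases_logic(selected_symptoms_set, disease_symptom_map_arg):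
--     candidates = sorted(disease_symptom_map_arg.keys())
--     for symptom in selected_symptoms_set:
--         candidates = [d for d in candidates if symptom in disease_symptom_map_arg[d]]
--     return candidates
-- ===== Notes on version B (the rewrite author's own statement) =====
-- stated objective: simpler
-- what changed: B sorts the disease keys once up front and then iterates over the selected symptoms, pruning the candidate list per symptom, instead of A's per-disease subset test followed by a final sort; the empty-selection special case disappears.
import Mathlib
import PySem

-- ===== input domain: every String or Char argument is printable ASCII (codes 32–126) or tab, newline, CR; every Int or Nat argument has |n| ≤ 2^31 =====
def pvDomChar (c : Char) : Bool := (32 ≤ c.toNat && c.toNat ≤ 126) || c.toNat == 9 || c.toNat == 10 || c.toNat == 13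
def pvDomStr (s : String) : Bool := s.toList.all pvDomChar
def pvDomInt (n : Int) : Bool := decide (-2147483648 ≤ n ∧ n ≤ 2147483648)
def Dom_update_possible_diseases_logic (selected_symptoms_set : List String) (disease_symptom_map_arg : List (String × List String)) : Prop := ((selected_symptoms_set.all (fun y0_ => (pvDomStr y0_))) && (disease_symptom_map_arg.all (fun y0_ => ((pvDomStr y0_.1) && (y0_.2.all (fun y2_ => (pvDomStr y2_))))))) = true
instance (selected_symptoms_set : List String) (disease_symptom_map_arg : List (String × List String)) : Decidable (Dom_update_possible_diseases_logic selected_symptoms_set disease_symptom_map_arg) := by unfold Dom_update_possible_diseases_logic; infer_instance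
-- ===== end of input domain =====

-- B replaces A's per-disease subset scan + final sort by sorting the keys once and pruning the
-- candidate list per selected symptom (simpler: no empty-selection special case).

-- ===== PORT A =====
def update_possible_diseases_logic (selected_symptoms_set : List String) (disease_symptom_map_arg : List (String × List String)) : List String :=
  if selected_symptoms_set = [] then
    PySem.List.sorted (disease_symptom_map_arg.map Prod.fst) (fun x => x)
  else
    PySem.List.sorted
      (disease_symptom_map_arg.foldl
        (fun acc p =>
          if PySem.Set.issubset selected_symptoms_set (PySem.Set.ofList p.2) then
            acc ++ [p.1]
          else acc)
        [])
      (fun x => x)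

-- ===== PORT B =====
-- `disease_symptom_map_arg[d]` in Source B is looked up only for d drawn from the keys, so it never
-- raises; `Dict.getD … []` is exact there.
def update_possible_diseases_logic_alt (selected_symptoms_set : List String) (disease_symptom_map_arg : List (String × List String)) : List String :=
  selected_symptoms_set.foldl
    (fun candidates symptom =>
      candidates.filter
        (fun d => (PySem.Dict.getD ⟨disease_symptom_map_arg⟩ d []).contains symptom))
    (PySem.List.sorted (disease_symptom_map_arg.map Prod.fst) (fun x => x))

-- ===== PRECONDITION & SPEC =====
-- Pre_ only requires the association list to be a faithful representation of a Python dict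
-- (pairwise-distinct keys); a duplicate-key list corresponds to no Python input at all,
-- since a dict collapses duplicates before A ever sees them.
def Pre_update_possible_diseases_logic (selected_symptoms_set : List String) (disease_symptom_map_arg : List (String × List String)) : Prop :=
  (disease_symptom_map_arg.map Prod.fst).Nodup
instance (selected_symptoms_set : List String) (disease_symptom_map_arg : List (String × List String)) : Decidable (Pre_update_possible_diseases_logic selected_symptoms_set disease_symptom_map_arg) := by unfold Pre_update_possible_diseases_logic; infer_instance

def pvWitness_update_possible_diseases_logic : List String × (List (String × List String)) :=
  (["a"], [("flu", ["a", "b"]), ("cold", ["c"])])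

def Spec_update_possible_diseases_logic (selected_symptoms_set : List String) (disease_symptom_map_arg : List (String × List String)) (out : List String) : Prop := out = update_possible_diseases_logic_alt selected_symptoms_set disease_symptom_map_arg
instance (selected_symptoms_set : List String) (disease_symptom_map_arg : List (String × List String)) (out : List String) : Decidable (Spec_update_possible_diseases_logic selected_symptoms_set disease_symptom_map_arg out) := by unfold Spec_update_possible_diseases_logic; infer_instance

-- ===== CLAIM (what is proved, stated in full; the proofs are below) =====
def Claim_equal_update_possible_diseases_logic : Prop := ∀ (selected_symptoms_set : List String) (disease_symptom_map_arg : List (String × List String)), Dom_update_possible_diseases_logic selected_symptoms_set disease_symptom_map_arg → Pre_update_possible_diseases_logic selected_symptoms_set disease_symptom_map_arg → Spec_update_possible_diseases_logic selected_symptoms_set disease_symptom_map_arg (update_possible_diseases_logic selected_symptoms_set disease_symptom_map_arg)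

-- ===== LEMMAS AND PROOFS =====

-- A's subset test, written as a scan of the selected symptoms over the raw symptom list.
lemma issubset_eq_all (sel l : List String) :
    PySem.Set.issubset sel (PySem.Set.ofList l) = sel.all (fun s => l.contains s) := by
  by_cases h : ∀ x ∈ sel, x ∈ l
  · rw [(PySem.Set.issubset_iff sel (PySem.Set.ofList l)).mpr
      (fun x hx => (PySem.Set.mem_ofList l x).mpr (h x hx))]
    symm
    simpa using h
  · have h1 : ¬ PySem.Set.issubset sel (PySem.Set.ofList l) = true := by
      intro hc
      exact h (fun x hx => (PySem.Set.mem_ofList l x).mp ((PySem.Set.issubset_iff _ _).mp hc x hx))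
    simp only [Bool.not_eq_true] at h1
    rw [h1]
    symm
    simp only [List.all_eq_false]
    rcases not_forall.mp h with ⟨x, hx⟩
    rcases Classical.not_imp.mp hx with ⟨hx1, hx2⟩
    exact ⟨x, hx1, by simpa using hx2⟩

-- Successive filtering by each symptom equals one filter by the conjunction.
lemma foldl_filter_all (p : String → String → Bool) (sel init : List String) :
    sel.foldl (fun c s => c.filter (p s)) init
      = init.filter (fun d => sel.all (fun s => p s d)) := by
  induction sel generalizing init with
  | nil => simp
  | cons s t ih =>
    simp only [List.foldl_cons, ih, List.filter_filter, List.all_cons]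
    exact List.filter_congr (fun x _ => by rw [Bool.and_comm])

-- With pairwise-distinct keys, filtering the pairs and projecting equals filtering the keys
-- through the dictionary lookup.
lemma filter_key_eq (sel : List String) (dmap : List (String × List String))
    (h : (dmap.map Prod.fst).Nodup) :
    (dmap.filter (fun p => sel.all (fun s => p.2.contains s))).map Prod.fst
      = (dmap.map Prod.fst).filter
          (fun d => sel.all (fun s => (PySem.Dict.getD ⟨dmap⟩ d []).contains s)) := by
  induction dmap with
  | nil => simp
  | cons p rest ih =>
    simp only [List.map_cons, List.nodup_cons] at h
    obtain ⟨hni, hn⟩ := h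
    have hget : PySem.Dict.getD ⟨p :: rest⟩ p.1 [] = p.2 := by
      simp [PySem.Dict.getD, PySem.Dict.get?, List.find?]
    have hrest : (rest.map Prod.fst).filter
          (fun d => sel.all (fun s => (PySem.Dict.getD ⟨p :: rest⟩ d []).contains s))
        = (rest.map Prod.fst).filter
          (fun d => sel.all (fun s => (PySem.Dict.getD ⟨rest⟩ d []).contains s)) := by
      refine List.filter_congr ?_
      intro d hd
      have hne : p.1 ≠ d := fun e => hni (e ▸ hd)
      have hbe : (p.1 == d) = false := by simp [hne]
      simp [PySem.Dict.getD, PySem.Dict.get?, hbe]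
    simp only [List.filter_cons, hget, List.map_cons]
    rw [hrest, ← ih hn]
    split_ifs with hc
    · rw [List.map_cons]
    · rfl

-- Sorting then filtering equals filtering then sorting.
lemma sorted_filter_comm (q : String → Bool) (keys : List String) :
    PySem.List.sorted (keys.filter q) (fun x => x)
      = (PySem.List.sorted keys (fun x => x)).filter q := by
  apply PySem.List.sorted_id_eq_of_perm_of_pairwise
  · exact (PySem.List.sorted_perm keys (fun x => x) false).filter q
  · exact List.Pairwise.sublist List.filter_sublist (PySem.List.sorted_pairwise keys (fun x => x))

-- ===== VERDICT (by name: the statement is the Claim_ definition above) =====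
theorem update_possible_diseases_logic_spec : Claim_equal_update_possible_diseases_logic := by
  intro sel dmap _ hpre
  show update_possible_diseases_logic sel dmap = update_possible_diseases_logic_alt sel dmap
  unfold update_possible_diseases_logic update_possible_diseases_logic_alt
  rw [foldl_filter_all (fun s d => (PySem.Dict.getD ⟨dmap⟩ d []).contains s) sel]
  by_cases hs : sel = []
  · simp [hs]
  · rw [if_neg hs, PySem.List.foldl_append_if]
    have hA : dmap.filter (fun p => PySem.Set.issubset sel (PySem.Set.ofList p.2))
        = dmap.filter (fun p => sel.all (fun s => p.2.contains s)) :=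
      List.filter_congr (fun p _ => issubset_eq_all sel p.2)
    rw [hA, List.nil_append, filter_key_eq sel dmap hpre, sorted_filter_comm]
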